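-- pv_equiv track=rewrite | github.com/sony/SIoT-LSLtool | lsl_tools/data/slide_windows_restore.py | get_overlap_area
-- ===== SOURCE A (Python) =====
-- def get_overlap_area(width, height, slide_window_infos, extend=20):
--     y_start = []
--     y_end = []
--     x_start = []
--     x_end = []
--     for key, value in  slide_window_infos.items():
--         if key.split("_")[0] == '0':
--             y_start.append(value[1])
--             y_end.append(value[1] + height)
--         if key.split("_")[1] == '0':
--             x_start.append(value[0])
--             x_end.append(value[0] + width)
--     x_start = x_start[1:]
--     x_end = x_end[: -1]
--     y_start = y_start[1:]
--     y_end = y_end[: -1]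
--     overlap_x_area = [[x1-extend, x2+extend] for x1, x2 in zip(x_start, x_end)]
--     overlap_y_area = [[y1-extend, y2+extend] for y1, y2 in zip(y_start, y_end)]
--     return [overlap_x_area, overlap_y_area]
-- ===== SOURCE B (Python) =====
-- def get_overlap_area(width, height, slide_window_infos, extend=20):
--     prev_x = None
--     prev_y = None
--     overlap_x_area = []
--     overlap_y_area = []
--     for key, value in slide_window_infos.items():
--         parts = key.split("_")
--         if parts[0] == '0':
--             y = value[1]
--             if prev_y is not None:
--                 overlap_y_area.append([y - extend, prev_y + height + extend])
--             prev_y = y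
--         if parts[1] == '0':
--             x = value[0]
--             if prev_x is not None:
--                 overlap_x_area.append([x - extend, prev_x + width + extend])
--             prev_x = x
--     return [overlap_x_area, overlap_y_area]
-- ===== Notes on version B (the rewrite author's own statement) =====
-- stated objective: alternative
-- what changed: B computes each overlap online in one pass with prev_x/prev_y sentinels, instead of A's building four start/end lists, slicing them with [1:]/[:-1] and zipping the slices.
import Mathlib
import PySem

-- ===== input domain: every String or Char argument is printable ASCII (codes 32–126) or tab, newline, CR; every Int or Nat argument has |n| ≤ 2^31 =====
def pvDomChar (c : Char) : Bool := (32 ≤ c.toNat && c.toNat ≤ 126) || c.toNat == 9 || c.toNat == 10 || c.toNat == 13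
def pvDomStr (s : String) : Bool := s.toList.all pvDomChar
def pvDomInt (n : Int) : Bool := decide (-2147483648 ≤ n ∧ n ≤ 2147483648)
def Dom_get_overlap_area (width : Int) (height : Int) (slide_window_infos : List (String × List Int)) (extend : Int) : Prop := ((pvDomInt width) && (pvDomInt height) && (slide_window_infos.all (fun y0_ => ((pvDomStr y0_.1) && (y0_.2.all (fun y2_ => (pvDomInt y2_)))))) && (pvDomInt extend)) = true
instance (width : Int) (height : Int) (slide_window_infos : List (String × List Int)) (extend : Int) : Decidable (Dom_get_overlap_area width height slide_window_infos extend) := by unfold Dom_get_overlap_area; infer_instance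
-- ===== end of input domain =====

-- B replaces A's four start/end lists + [1:]/[:-1] slices + zip by one online pass
-- keeping prev_x/prev_y sentinels (objective: alternative decomposition, same cost).

-- ===== PORT A =====
-- loop body of A: append to the four lists y_start, y_end, x_start, x_end
def stepA (width height : Int) (acc : List Int × List Int × List Int × List Int)
    (kv : String × List Int) : List Int × List Int × List Int × List Int :=
  let segs := (PySem.Str.split? kv.1 "_").getD []
  let acc :=
    if PySem.List.pyGetD segs 0 "" = "0" then
      (acc.1 ++ [PySem.List.pyGetD kv.2 1 0],
       acc.2.1 ++ [PySem.List.pyGetD kv.2 1 0 + height], acc.2.2.1, acc.2.2.2)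
    else acc
  if PySem.List.pyGetD segs 1 "" = "0" then
    (acc.1, acc.2.1, acc.2.2.1 ++ [PySem.List.pyGetD kv.2 0 0],
     acc.2.2.2 ++ [PySem.List.pyGetD kv.2 0 0 + width])
  else acc

def get_overlap_area (width : Int) (height : Int) (slide_window_infos : List (String × List Int)) (extend : Int) : List (List (List Int)) :=
  let st := ((PySem.Dict.ofList slide_window_infos).items).foldl (stepA width height) ([], [], [], [])
  let x_start := PySem.List.slice st.2.2.1 (some 1) none
  let x_end := PySem.List.slice st.2.2.2 none (some (-1))
  let y_start := PySem.List.slice st.1 (some 1) none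
  let y_end := PySem.List.slice st.2.1 none (some (-1))
  [ (x_start.zip x_end).map (fun p => [p.1 - extend, p.2 + extend]),
    (y_start.zip y_end).map (fun p => [p.1 - extend, p.2 + extend]) ]

-- ===== PORT B =====
-- loop body of B: state (prev_x, prev_y, overlap_x_area, overlap_y_area)
def stepB (width height extend : Int)
    (acc : Option Int × Option Int × List (List Int) × List (List Int))
    (kv : String × List Int) : Option Int × Option Int × List (List Int) × List (List Int) :=
  let segs := (PySem.Str.split? kv.1 "_").getD []
  let acc :=
    if PySem.List.pyGetD segs 0 "" = "0" then
      let y := PySem.List.pyGetD kv.2 1 0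
      (acc.1, some y, acc.2.2.1,
        match acc.2.1 with
        | some p => acc.2.2.2 ++ [[y - extend, p + height + extend]]
        | none => acc.2.2.2)
    else acc
  if PySem.List.pyGetD segs 1 "" = "0" then
    let x := PySem.List.pyGetD kv.2 0 0
    (some x, acc.2.1,
      (match acc.1 with
       | some p => acc.2.2.1 ++ [[x - extend, p + width + extend]]
       | none => acc.2.2.1), acc.2.2.2)
  else acc

def get_overlap_area_alt (width : Int) (height : Int) (slide_window_infos : List (String × List Int)) (extend : Int) : List (List (List Int)) :=
  let st := ((PySem.Dict.ofList slide_window_infos).items).foldl (stepB width height extend) (none, none, [], [])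
  [st.2.2.1, st.2.2.2]

-- ===== PRECONDITION & SPEC =====
-- Pre_ excludes exactly the inputs where Python A raises IndexError: a key with no '_'
-- (key.split("_")[1]), or a value list too short for value[1] / value[0] on a matching key.
def Pre_get_overlap_area (width : Int) (height : Int) (slide_window_infos : List (String × List Int)) (extend : Int) : Prop :=
  ∀ kv ∈ slide_window_infos,
    2 ≤ ((PySem.Str.split? kv.1 "_").getD []).length ∧
    (((PySem.Str.split? kv.1 "_").getD []).getD 0 "" = "0" → 2 ≤ kv.2.length) ∧
    (((PySem.Str.split? kv.1 "_").getD []).getD 1 "" = "0" → 1 ≤ kv.2.length)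
instance (width : Int) (height : Int) (slide_window_infos : List (String × List Int)) (extend : Int) : Decidable (Pre_get_overlap_area width height slide_window_infos extend) := by unfold Pre_get_overlap_area; infer_instance

def pvWitness_get_overlap_area : Int × Int × (List (String × List Int)) × Int :=
  (100, 100, [("0_0", [0, 0]), ("0_1", [90, 0]), ("1_0", [0, 90])], 20)

def Spec_get_overlap_area (width : Int) (height : Int) (slide_window_infos : List (String × List Int)) (extend : Int) (out : List (List (List Int))) : Prop := out = get_overlap_area_alt width height slide_window_infos extend
instance (width : Int) (height : Int) (slide_window_infos : List (String × List Int)) (extend : Int) (out : List (List (List Int))) : Decidable (Spec_get_overlap_area width height slide_window_infos extend out) := by unfold Spec_get_overlap_area; infer_instance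

-- ===== CLAIM (what is proved, stated in full; the proofs are below) =====
def Claim_equal_get_overlap_area : Prop := ∀ (width : Int) (height : Int) (slide_window_infos : List (String × List Int)) (extend : Int), Dom_get_overlap_area width height slide_window_infos extend → Pre_get_overlap_area width height slide_window_infos extend → Spec_get_overlap_area width height slide_window_infos extend (get_overlap_area width height slide_window_infos extend)

-- ===== LEMMAS AND PROOFS =====

-- the values A collects into y_start (resp. x_start)
def yvals (L : List (String × List Int)) : List Int :=
  (L.filter (fun kv => PySem.List.pyGetD ((PySem.Str.split? kv.1 "_").getD []) 0 "" == "0")).map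
    (fun kv => PySem.List.pyGetD kv.2 1 0)
def xvals (L : List (String × List Int)) : List Int :=
  (L.filter (fun kv => PySem.List.pyGetD ((PySem.Str.split? kv.1 "_").getD []) 1 "" == "0")).map
    (fun kv => PySem.List.pyGetD kv.2 0 0)

-- B's running "last seen" sentinel and its emitted pairs, as functions of the value list
def lastO (p : Option Int) : List Int → Option Int
  | [] => p
  | a :: r => lastO (some a) r

def bpairs (c e : Int) (p : Option Int) : List Int → List (List Int)
  | [] => []
  | a :: r => (match p with | none => [] | some q => [[a - e, q + c + e]]) ++ bpairs c e (some a) r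

lemma foldA_char (w h : Int) (L : List (String × List Int)) :
    ∀ ys ye xs xe : List Int,
    L.foldl (stepA w h) (ys, ye, xs, xe)
      = (ys ++ yvals L, ye ++ (yvals L).map (· + h),
         xs ++ xvals L, xe ++ (xvals L).map (· + w)) := by
  induction L with
  | nil => simp [yvals, xvals]
  | cons kv L ih =>
      intro ys ye xs xe
      simp only [List.foldl_cons, stepA, yvals, xvals, List.filter_cons]
      by_cases h0 : PySem.List.pyGetD ((PySem.Str.split? kv.1 "_").getD []) 0 "" = "0" <;>
        by_cases h1 : PySem.List.pyGetD ((PySem.Str.split? kv.1 "_").getD []) 1 "" = "0" <;>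
          simp [h0, h1, ih, yvals, xvals, List.append_assoc]

lemma foldB_char (w h e : Int) (L : List (String × List Int)) :
    ∀ (px py : Option Int) (ox oy : List (List Int)),
    L.foldl (stepB w h e) (px, py, ox, oy)
      = (lastO px (xvals L), lastO py (yvals L),
         ox ++ bpairs w e px (xvals L), oy ++ bpairs h e py (yvals L)) := by
  induction L with
  | nil => simp [yvals, xvals, lastO, bpairs]
  | cons kv L ih =>
      intro px py ox oy
      simp only [List.foldl_cons, stepB, yvals, xvals, List.filter_cons]
      by_cases h0 : PySem.List.pyGetD ((PySem.Str.split? kv.1 "_").getD []) 0 "" = "0" <;>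
        by_cases h1 : PySem.List.pyGetD ((PySem.Str.split? kv.1 "_").getD []) 1 "" = "0" <;>
          cases px <;> cases py <;>
            simp [h0, h1, ih, yvals, xvals, lastO, bpairs, List.append_assoc]

-- B's emitted pairs are exactly A's zip of the shifted slices
lemma bpairs_some (c e : Int) (v : List Int) :
    ∀ p : Int, bpairs c e (some p) v
      = (v.zip ((p :: v).map (· + c))).map (fun q => [q.1 - e, q.2 + e]) := by
  induction v with
  | nil => intro p; simp [bpairs]
  | cons a r ih => intro p; simp [bpairs, ih a]

lemma bpairs_none (c e : Int) (v : List Int) :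
    bpairs c e none v
      = (v.tail.zip (v.map (· + c))).map (fun q => [q.1 - e, q.2 + e]) := by
  cases v with
  | nil => simp [bpairs]
  | cons a r => simp [bpairs, bpairs_some]

-- zip truncates, so dropping the last element of the longer right list changes nothing
lemma zip_dropLast_of_lt {α β : Type} (l : List α) (l' : List β) (h : l.length < l'.length) :
    l.zip l'.dropLast = l.zip l' := by
  rw [List.dropLast_eq_take, List.zip_eq_zip_take_min, List.zip_eq_zip_take_min (l₂ := l')]
  rw [List.length_take, List.take_take]
  congr 2 <;> omega

lemma zip_shift_eq_bpairs (c e : Int) (v : List Int) :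
    (v.tail.zip ((v.map (· + c)).dropLast)).map (fun q => [q.1 - e, q.2 + e])
      = bpairs c e none v := by
  rw [bpairs_none]
  cases v with
  | nil => simp
  | cons a r =>
      rw [zip_dropLast_of_lt]
      simp

lemma main_eq (w h : Int) (L : List (String × List Int)) (e : Int) :
    get_overlap_area w h L e = get_overlap_area_alt w h L e := by
  simp only [get_overlap_area, get_overlap_area_alt,
    foldA_char w h ((PySem.Dict.ofList L).items) [] [] [] [],
    foldB_char w h e ((PySem.Dict.ofList L).items) none none [] [],
    List.nil_append,
    PySem.List.slice_from_one, PySem.List.slice_to_neg_one]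
  rw [zip_shift_eq_bpairs, zip_shift_eq_bpairs]

-- ===== VERDICT (by name: the statement is the Claim_ definition above) =====
theorem get_overlap_area_spec : Claim_equal_get_overlap_area := by
  intro w h L e _ _
  unfold Spec_get_overlap_area
  exact main_eq w h L e
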